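-- pv_equiv track=rewrite | github.com/nrtrinid/ev-tracker | backend/services/player_props.py | _merge_api_requests_remaining
-- ===== SOURCE A (Python) =====
-- def _merge_api_requests_remaining(values: list[str | None]) -> str | None:
--     remaining_values = [value for value in values if value is not None]
--     if not remaining_values:
--         return None
--
--     numeric_values: list[int] = []
--     for value in remaining_values:
--         try:
--             numeric_values.append(int(str(value)))
--         except (TypeError, ValueError):
--             return str(value)
--
--     return str(min(numeric_values)) if numeric_values else None
-- ===== SOURCE B (Python) =====
-- def _parse(value):
--     try:
--         return int(str(value))
--     except (TypeError, ValueError):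
--         return None
--
--
-- def _merge_api_requests_remaining(values):
--     parsed = [(_parse(v), v) for v in values if v is not None]
--     if not parsed:
--         return None
--     for n, v in parsed:
--         if n is None:
--             return str(v)
--     return str(sorted(n for n, _ in parsed)[0])
-- ===== Notes on version B (the rewrite author's own statement) =====
-- stated objective: alternative
-- what changed: Instead of A's exception-driven loop that collects parsed ints and takes min at the end, B eagerly parses every non-None value into (parse-result, original) pairs, scans the pairs for the first failed parse, and otherwise sorts the parsed ints and returns the first element.
import Mathlib
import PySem

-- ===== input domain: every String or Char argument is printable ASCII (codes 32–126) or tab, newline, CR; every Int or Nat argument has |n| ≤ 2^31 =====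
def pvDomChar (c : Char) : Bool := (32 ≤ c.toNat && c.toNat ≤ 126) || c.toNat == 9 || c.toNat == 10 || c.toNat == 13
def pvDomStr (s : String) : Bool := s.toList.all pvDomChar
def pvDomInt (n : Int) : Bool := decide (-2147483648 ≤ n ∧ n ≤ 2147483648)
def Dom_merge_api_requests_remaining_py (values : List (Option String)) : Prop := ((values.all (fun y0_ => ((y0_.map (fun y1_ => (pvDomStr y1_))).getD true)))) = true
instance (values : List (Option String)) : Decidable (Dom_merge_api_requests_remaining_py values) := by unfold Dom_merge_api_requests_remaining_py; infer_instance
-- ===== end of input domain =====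

-- B replaces A's exception-driven collect-then-min loop with an eager parse of every value into
-- (parse-result, original) pairs, then a search for the first failure, else sorted(...)[0] (objective: alternative).

-- ===== PORT A =====
-- A's for-loop: append int(value) to nums, or return the unparseable value; at the end str(min(nums)) if nums else None
def mergeA_loop : List String → List Int → Option String
  | [], nums =>
      match PySem.List.min? nums (fun x => x) with
      | some m => some (PySem.Int.toStr m)
      | none => none
  | v :: rest, nums =>
      match PySem.Int.ofStr? v with
      | some n => mergeA_loop rest (nums ++ [n])
      | none => some v

def merge_api_requests_remaining_py (values : List (Option String)) : Option String :=
  let remaining := values.filterMap id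
  if remaining = [] then none
  else mergeA_loop remaining []

-- ===== PORT B =====
-- B: parsed = [(_parse(v), v) …]; empty → None; first pair with failed parse → its value; else sorted(nums)[0]
def merge_api_requests_remaining_py_alt (values : List (Option String)) : Option String :=
  let parsed := (values.filterMap id).map (fun v => (PySem.Int.ofStr? v, v))
  if parsed = [] then none
  else
    match parsed.find? (fun p => p.1 == none) with
    | some p => some p.2
    | none =>
        match PySem.List.sorted (parsed.filterMap Prod.fst) (fun x => x) false with
        | m :: _ => some (PySem.Int.toStr m)
        | [] => none

-- ===== PRECONDITION & SPEC =====
def Spec_merge_api_requests_remaining_py (values : List (Option String)) (out : Option String) : Prop := out = merge_api_requests_remaining_py_alt values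
instance (values : List (Option String)) (out : Option String) : Decidable (Spec_merge_api_requests_remaining_py values out) := by unfold Spec_merge_api_requests_remaining_py; infer_instance

-- ===== CLAIM =====
def Claim_equal_merge_api_requests_remaining_py : Prop := ∀ (values : List (Option String)), Dom_merge_api_requests_remaining_py values → Spec_merge_api_requests_remaining_py values (merge_api_requests_remaining_py values)

-- ===== LEMMAS AND PROOFS =====

-- common characterisation of A's loop: first unparseable wins, else min of accumulated ++ parsed
def mergeSpec (rs : List String) (nums : List Int) : Option String :=
  match rs.find? (fun v => PySem.Int.ofStr? v == none) with
  | some v => some v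
  | none => (PySem.List.min? (nums ++ rs.filterMap PySem.Int.ofStr?) (fun x => x)).map PySem.Int.toStr

lemma mergeA_loop_eq_spec (rs : List String) (nums : List Int) :
    mergeA_loop rs nums = mergeSpec rs nums := by
  induction rs generalizing nums with
  | nil => simp [mergeA_loop, mergeSpec]; cases PySem.List.min? nums (fun x => x) <;> rfl
  | cons v rest ih =>
      simp only [mergeA_loop, mergeSpec]
      cases h : PySem.Int.ofStr? v with
      | none => simp [List.find?, h]
      | some n =>
          show mergeA_loop rest (nums ++ [n]) = _
          rw [ih]
          simp [mergeSpec, List.find?, h]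

lemma head_sorted_eq_min (ns : List Int) :
    (match PySem.List.sorted ns (fun x => x) false with
     | m :: _ => some m
     | [] => (none : Option Int)) = PySem.List.min? ns (fun x => x) := by
  cases hs : PySem.List.sorted ns (fun x => x) false with
  | nil =>
      have : ns = [] := (PySem.List.sorted_eq_nil_iff _ _ _).1 hs
      subst this; rfl
  | cons m t =>
      have hmem : m ∈ ns := (PySem.List.mem_sorted _ _ _ _).1 (by rw [hs]; exact List.mem_cons_self ..)
      have hne : ns ≠ [] := by intro h; subst h; simp at hmem
      cases hmin : PySem.List.min? ns (fun x => x) with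
      | none => exact absurd ((PySem.List.min?_eq_none_iff _ _).1 hmin) hne
      | some mm =>
          have hmm_mem : mm ∈ ns := PySem.List.min?_mem hmin
          have h1 : mm ≤ m := PySem.List.min?_isMin hmin m hmem
          have h2 : m ≤ mm := PySem.List.key_head_sorted_le _ _ hs mm hmm_mem
          simp [le_antisymm h1 h2]

-- ===== VERDICT =====
theorem merge_api_requests_remaining_py_spec : Claim_equal_merge_api_requests_remaining_py := by
  intro values _
  show merge_api_requests_remaining_py values = merge_api_requests_remaining_py_alt values
  unfold merge_api_requests_remaining_py merge_api_requests_remaining_py_alt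
  simp only []
  set rs := values.filterMap id with hrs
  by_cases he : rs = []
  · simp [he]
  · have hpe : rs.map (fun v => (PySem.Int.ofStr? v, v)) ≠ [] := by
      simpa using he
    rw [if_neg he, if_neg hpe, mergeA_loop_eq_spec]
    unfold mergeSpec
    rw [List.find?_map]
    have hpred : ((fun p => p.1 == none) ∘ fun v => (PySem.Int.ofStr? v, v)) =
        (fun v => PySem.Int.ofStr? v == none) := rfl
    rw [hpred]
    cases hf : rs.find? (fun v => PySem.Int.ofStr? v == none) with
    | some v => rfl
    | none =>
        simp only [Option.map_none]
        have hfm : (rs.map (fun v => (PySem.Int.ofStr? v, v))).filterMap Prod.fst =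
            rs.filterMap PySem.Int.ofStr? := by
          rw [List.filterMap_map]; rfl
        rw [hfm, List.nil_append]
        have hh := head_sorted_eq_min (rs.filterMap PySem.Int.ofStr?)
        cases hs2 : PySem.List.sorted (rs.filterMap PySem.Int.ofStr?) (fun x => x) false <;>
          rw [hs2] at hh <;> rw [← hh] <;> rfl
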